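-- pv_equiv track=rewrite | github.com/raymondclowe/ttslo | validator.py | _is_stablecoin_pair
-- ===== SOURCE A (Python) =====
-- def _is_stablecoin_pair(pair: str) -> bool:
--     """
--     Determine if a trading pair involves a stablecoin as the quote currency.
--
--     This includes:
--     - USD, USDT, USDC (traditional stablecoins)
--     - EUR, GBP, JPY (fiat currencies, treated as stable)
--
--     Args:
--         pair: Trading pair (e.g., 'XXBTZUSD', 'ETHUSDT', 'XETHZEUR')
--
--     Returns:
--         True if the pair quotes against a stablecoin/fiat, False otherwise
--     """
--     if not pair:
--         return False
--
--     pair_upper = pair.upper()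
--
--     # List of stablecoin and fiat quote currencies
--     stablecoin_quotes = [
--         'USDT',   # Tether
--         'USDC',   # USD Coin
--         'ZUSD',   # Kraken's USD notation
--         'USD',    # Direct USD
--         'ZEUR',   # Kraken's EUR notation
--         'EUR',    # Direct EUR
--         'ZGBP',   # Kraken's GBP notation
--         'GBP',    # Direct GBP
--         'ZJPY',   # Kraken's JPY notation
--         'JPY',    # Direct JPY
--         'DAI',    # DAI stablecoin
--         'BUSD',   # Binance USD
--     ]
--
--     # Check if pair ends with any stablecoin quote currency
--     for quote in stablecoin_quotes:
--         if pair_upper.endswith(quote):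
--             return True
--
--     return False
-- ===== SOURCE B (Python) =====
-- # Reversed-suffix trie walk: a character-level DFA over the last characters,
-- # instead of testing whole suffixes against a quote list.
-- # States are reversed prefixes of the reversed quote currencies; walking the
-- # string back-to-front, reaching an accepting state means some quote is a suffix.
-- _TRANS = {
--     (0, 'T'): 1, (1, 'D'): 2, (2, 'S'): 3, (3, 'U'): 4,      # USDT
--     (0, 'C'): 5, (5, 'D'): 6, (6, 'S'): 7, (7, 'U'): 8,      # USDC
--     (0, 'D'): 9, (9, 'S'): 10, (10, 'U'): 11,                # USD (covers ZUSD, BUSD)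
--     (0, 'R'): 12, (12, 'U'): 13, (13, 'E'): 14,              # EUR (covers ZEUR)
--     (0, 'P'): 15, (15, 'B'): 16, (16, 'G'): 17,              # GBP (covers ZGBP)
--     (0, 'Y'): 18, (18, 'P'): 19, (19, 'J'): 20,              # JPY (covers ZJPY)
--     (0, 'I'): 21, (21, 'A'): 22, (22, 'D'): 23,              # DAI
-- }
-- _ACCEPT = {4, 8, 11, 14, 17, 20, 23}
--
--
-- def _is_stablecoin_pair(pair: str) -> bool:
--     if not pair:
--         return False
--     state = 0
--     for ch in reversed(pair.upper()):
--         nxt = _TRANS.get((state, ch))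
--         if nxt is None:
--             return False
--         if nxt in _ACCEPT:
--             return True
--         state = nxt
--     return False
-- ===== Notes on version B (the rewrite author's own statement) =====
-- stated objective: alternative
-- what changed: Replaces the linear scan of 12 whole-suffix endswith tests with a character-level DFA: the string is walked back-to-front through a reversed-suffix trie (a (state,char)->state transition table plus accepting states), so each trailing character is examined once and at most 4 characters are ever read.
import Mathlib
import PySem

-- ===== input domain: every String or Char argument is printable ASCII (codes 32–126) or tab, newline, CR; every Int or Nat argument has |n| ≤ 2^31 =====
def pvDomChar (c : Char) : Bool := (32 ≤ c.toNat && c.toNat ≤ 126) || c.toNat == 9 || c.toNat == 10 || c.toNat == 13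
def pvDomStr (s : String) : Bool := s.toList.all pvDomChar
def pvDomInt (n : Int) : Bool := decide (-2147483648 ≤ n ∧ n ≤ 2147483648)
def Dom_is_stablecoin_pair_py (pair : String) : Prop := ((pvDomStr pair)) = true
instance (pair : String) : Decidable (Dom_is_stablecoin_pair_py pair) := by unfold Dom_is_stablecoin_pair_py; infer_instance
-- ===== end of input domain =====

-- B replaces A's linear scan of 12 endswith tests by a character-level DFA: the string is
-- walked back-to-front through a reversed-suffix trie (transition table + accepting states).


-- ===== PORT A =====
-- the 'for quote in stablecoin_quotes: if pair_upper.endswith(quote): return True' loop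
def pvQuoteLoop (pu : String) : List String → Bool
  | [] => false
  | q :: rest => if PySem.Str.endswith pu q then true else pvQuoteLoop pu rest

def is_stablecoin_pair_py (pair : String) : Bool :=
  if pair = "" then false
  else
    pvQuoteLoop (PySem.Str.upper pair)
      ["USDT", "USDC", "ZUSD", "USD", "ZEUR", "EUR", "ZGBP", "GBP", "ZJPY", "JPY", "DAI", "BUSD"]

-- ===== PORT B =====
-- _TRANS: the reversed-suffix trie as a transition table (state, char) -> state
def pvTrans : PySem.Dict (Int × Char) Int :=
  PySem.Dict.ofList
  [((0, 'T'), 1), ((1, 'D'), 2), ((2, 'S'), 3), ((3, 'U'), 4),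
   ((0, 'C'), 5), ((5, 'D'), 6), ((6, 'S'), 7), ((7, 'U'), 8),
   ((0, 'D'), 9), ((9, 'S'), 10), ((10, 'U'), 11),
   ((0, 'R'), 12), ((12, 'U'), 13), ((13, 'E'), 14),
   ((0, 'P'), 15), ((15, 'B'), 16), ((16, 'G'), 17),
   ((0, 'Y'), 18), ((18, 'P'), 19), ((19, 'J'), 20),
   ((0, 'I'), 21), ((21, 'A'), 22), ((22, 'D'), 23)]

-- _ACCEPT
def pvAccept : PySem.Set Int := PySem.Set.ofList [4, 8, 11, 14, 17, 20, 23]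

-- the 'for ch in reversed(pair.upper()):' loop
def pvWalk (state : Int) : List Char → Bool
  | [] => false
  | c :: rest =>
    match PySem.Dict.get? pvTrans (state, c) with
    | none => false
    | some nxt => if PySem.Set.contains pvAccept nxt then true else pvWalk nxt rest

def is_stablecoin_pair_py_alt (pair : String) : Bool :=
  if pair = "" then false
  else pvWalk 0 (PySem.Str.upper pair).toList.reverse

-- ===== PRECONDITION & SPEC =====
def Spec_is_stablecoin_pair_py (pair : String) (out : Bool) : Prop := out = is_stablecoin_pair_py_alt pair
instance (pair : String) (out : Bool) : Decidable (Spec_is_stablecoin_pair_py pair out) := by unfold Spec_is_stablecoin_pair_py; infer_instance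

-- ===== CLAIM (what is proved, stated in full; the proofs are below) =====
def Claim_equal_is_stablecoin_pair_py : Prop := ∀ (pair : String), Dom_is_stablecoin_pair_py pair → Spec_is_stablecoin_pair_py pair (is_stablecoin_pair_py pair)

-- ===== LEMMAS AND PROOFS =====

-- pu.endswith(q) says q reversed is a prefix of pu reversed: the last |q| chars, read backwards
lemma endswith_rev (pu q : String) :
    PySem.Str.endswith pu q = (pu.toList.reverse.take q.toList.length == q.toList.reverse) := by
  rw [Bool.eq_iff_iff, PySem.Str.endswith_eq, PySem.Chars.endswith_iff, beq_iff_eq,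
    ← List.reverse_prefix, List.prefix_iff_eq_take, List.length_reverse]
  exact eq_comm

-- a 4-char reversed-suffix match subsumes its 3-char prefix match
lemma take3_of_take4 (r : List Char) (a b c d : Char) (h : r.take 4 = [a, b, c, d]) :
    r.take 3 = [a, b, c] := by
  have h3 : r.take 3 = (r.take 4).take 3 := by rw [List.take_take]; norm_num
  rw [h3, h]
  rfl

lemma pvTransEq : pvTrans = PySem.Dict.mk
  [((0, 'T'), 1), ((1, 'D'), 2), ((2, 'S'), 3), ((3, 'U'), 4),
   ((0, 'C'), 5), ((5, 'D'), 6), ((6, 'S'), 7), ((7, 'U'), 8),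
   ((0, 'D'), 9), ((9, 'S'), 10), ((10, 'U'), 11),
   ((0, 'R'), 12), ((12, 'U'), 13), ((13, 'E'), 14),
   ((0, 'P'), 15), ((15, 'B'), 16), ((16, 'G'), 17),
   ((0, 'Y'), 18), ((18, 'P'), 19), ((19, 'J'), 20),
   ((0, 'I'), 21), ((21, 'A'), 22), ((22, 'D'), 23)] := by decide
lemma walk3 (l : List Char) : pvWalk 3 l = (l.take 1 == ['U']) := by
  cases l with
  | nil => rfl
  | cons c r =>
    by_cases h : c = 'U'
    · simp [pvWalk, pvTransEq, pvAccept, PySem.Dict.get?_mk_cons, PySem.Set.contains, PySem.Set.ofList, h]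
    · simp [pvWalk, pvTransEq, PySem.Dict.get?, h, Ne.symm h]

lemma walk2 (l : List Char) : pvWalk 2 l = (l.take 2 == ['S','U']) := by
  cases l with
  | nil => rfl
  | cons c r =>
    by_cases h : c = 'S'
    · simp [pvWalk, pvTransEq, pvAccept, PySem.Dict.get?_mk_cons, PySem.Set.contains, PySem.Set.ofList, h, walk3]
    · simp [pvWalk, pvTransEq, PySem.Dict.get?, h, Ne.symm h]

lemma walk1 (l : List Char) : pvWalk 1 l = (l.take 3 == ['D','S','U']) := by
  cases l with
  | nil => rfl
  | cons c r =>
    by_cases h : c = 'D'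
    · simp [pvWalk, pvTransEq, pvAccept, PySem.Dict.get?_mk_cons, PySem.Set.contains, PySem.Set.ofList, h, walk2]
    · simp [pvWalk, pvTransEq, PySem.Dict.get?, h, Ne.symm h]

lemma walk7 (l : List Char) : pvWalk 7 l = (l.take 1 == ['U']) := by
  cases l with
  | nil => rfl
  | cons c r =>
    by_cases h : c = 'U'
    · simp [pvWalk, pvTransEq, pvAccept, PySem.Dict.get?_mk_cons, PySem.Set.contains, PySem.Set.ofList, h]
    · simp [pvWalk, pvTransEq, PySem.Dict.get?, h, Ne.symm h]

lemma walk6 (l : List Char) : pvWalk 6 l = (l.take 2 == ['S','U']) := by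
  cases l with
  | nil => rfl
  | cons c r =>
    by_cases h : c = 'S'
    · simp [pvWalk, pvTransEq, pvAccept, PySem.Dict.get?_mk_cons, PySem.Set.contains, PySem.Set.ofList, h, walk7]
    · simp [pvWalk, pvTransEq, PySem.Dict.get?, h, Ne.symm h]

lemma walk5 (l : List Char) : pvWalk 5 l = (l.take 3 == ['D','S','U']) := by
  cases l with
  | nil => rfl
  | cons c r =>
    by_cases h : c = 'D'
    · simp [pvWalk, pvTransEq, pvAccept, PySem.Dict.get?_mk_cons, PySem.Set.contains, PySem.Set.ofList, h, walk6]
    · simp [pvWalk, pvTransEq, PySem.Dict.get?, h, Ne.symm h]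

lemma walk10 (l : List Char) : pvWalk 10 l = (l.take 1 == ['U']) := by
  cases l with
  | nil => rfl
  | cons c r =>
    by_cases h : c = 'U'
    · simp [pvWalk, pvTransEq, pvAccept, PySem.Dict.get?_mk_cons, PySem.Set.contains, PySem.Set.ofList, h]
    · simp [pvWalk, pvTransEq, PySem.Dict.get?, h, Ne.symm h]

lemma walk9 (l : List Char) : pvWalk 9 l = (l.take 2 == ['S','U']) := by
  cases l with
  | nil => rfl
  | cons c r =>
    by_cases h : c = 'S'
    · simp [pvWalk, pvTransEq, pvAccept, PySem.Dict.get?_mk_cons, PySem.Set.contains, PySem.Set.ofList, h, walk10]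
    · simp [pvWalk, pvTransEq, PySem.Dict.get?, h, Ne.symm h]

lemma walk13 (l : List Char) : pvWalk 13 l = (l.take 1 == ['E']) := by
  cases l with
  | nil => rfl
  | cons c r =>
    by_cases h : c = 'E'
    · simp [pvWalk, pvTransEq, pvAccept, PySem.Dict.get?_mk_cons, PySem.Set.contains, PySem.Set.ofList, h]
    · simp [pvWalk, pvTransEq, PySem.Dict.get?, h, Ne.symm h]

lemma walk12 (l : List Char) : pvWalk 12 l = (l.take 2 == ['U','E']) := by
  cases l with
  | nil => rfl
  | cons c r =>
    by_cases h : c = 'U'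
    · simp [pvWalk, pvTransEq, pvAccept, PySem.Dict.get?_mk_cons, PySem.Set.contains, PySem.Set.ofList, h, walk13]
    · simp [pvWalk, pvTransEq, PySem.Dict.get?, h, Ne.symm h]

lemma walk16 (l : List Char) : pvWalk 16 l = (l.take 1 == ['G']) := by
  cases l with
  | nil => rfl
  | cons c r =>
    by_cases h : c = 'G'
    · simp [pvWalk, pvTransEq, pvAccept, PySem.Dict.get?_mk_cons, PySem.Set.contains, PySem.Set.ofList, h]
    · simp [pvWalk, pvTransEq, PySem.Dict.get?, h, Ne.symm h]

lemma walk15 (l : List Char) : pvWalk 15 l = (l.take 2 == ['B','G']) := by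
  cases l with
  | nil => rfl
  | cons c r =>
    by_cases h : c = 'B'
    · simp [pvWalk, pvTransEq, pvAccept, PySem.Dict.get?_mk_cons, PySem.Set.contains, PySem.Set.ofList, h, walk16]
    · simp [pvWalk, pvTransEq, PySem.Dict.get?, h, Ne.symm h]

lemma walk19 (l : List Char) : pvWalk 19 l = (l.take 1 == ['J']) := by
  cases l with
  | nil => rfl
  | cons c r =>
    by_cases h : c = 'J'
    · simp [pvWalk, pvTransEq, pvAccept, PySem.Dict.get?_mk_cons, PySem.Set.contains, PySem.Set.ofList, h]
    · simp [pvWalk, pvTransEq, PySem.Dict.get?, h, Ne.symm h]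

lemma walk18 (l : List Char) : pvWalk 18 l = (l.take 2 == ['P','J']) := by
  cases l with
  | nil => rfl
  | cons c r =>
    by_cases h : c = 'P'
    · simp [pvWalk, pvTransEq, pvAccept, PySem.Dict.get?_mk_cons, PySem.Set.contains, PySem.Set.ofList, h, walk19]
    · simp [pvWalk, pvTransEq, PySem.Dict.get?, h, Ne.symm h]

lemma walk22 (l : List Char) : pvWalk 22 l = (l.take 1 == ['D']) := by
  cases l with
  | nil => rfl
  | cons c r =>
    by_cases h : c = 'D'
    · simp [pvWalk, pvTransEq, pvAccept, PySem.Dict.get?_mk_cons, PySem.Set.contains, PySem.Set.ofList, h]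
    · simp [pvWalk, pvTransEq, PySem.Dict.get?, h, Ne.symm h]

lemma walk21 (l : List Char) : pvWalk 21 l = (l.take 2 == ['A','D']) := by
  cases l with
  | nil => rfl
  | cons c r =>
    by_cases h : c = 'A'
    · simp [pvWalk, pvTransEq, pvAccept, PySem.Dict.get?_mk_cons, PySem.Set.contains, PySem.Set.ofList, h, walk22]
    · simp [pvWalk, pvTransEq, PySem.Dict.get?, h, Ne.symm h]

lemma walk0 (l : List Char) : pvWalk 0 l = (l.take 4 == ['T','D','S','U'] || l.take 4 == ['C','D','S','U'] || l.take 3 == ['D','S','U'] || l.take 3 == ['R','U','E'] || l.take 3 == ['P','B','G'] || l.take 3 == ['Y','P','J'] || l.take 3 == ['I','A','D']) := by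
  cases l with
  | nil => rfl
  | cons c r =>
    by_cases hT : c = 'T'
    · simp [pvWalk, pvTransEq, pvAccept, PySem.Dict.get?_mk_cons, PySem.Set.contains, PySem.Set.ofList, hT, walk1]
    by_cases hC : c = 'C'
    · simp [pvWalk, pvTransEq, pvAccept, PySem.Dict.get?_mk_cons, PySem.Set.contains, PySem.Set.ofList, hC, walk5]
    by_cases hD : c = 'D'
    · simp [pvWalk, pvTransEq, pvAccept, PySem.Dict.get?_mk_cons, PySem.Set.contains, PySem.Set.ofList, hD, walk9]
    by_cases hR : c = 'R'
    · simp [pvWalk, pvTransEq, pvAccept, PySem.Dict.get?_mk_cons, PySem.Set.contains, PySem.Set.ofList, hR, walk12]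
    by_cases hP : c = 'P'
    · simp [pvWalk, pvTransEq, pvAccept, PySem.Dict.get?_mk_cons, PySem.Set.contains, PySem.Set.ofList, hP, walk15]
    by_cases hY : c = 'Y'
    · simp [pvWalk, pvTransEq, pvAccept, PySem.Dict.get?_mk_cons, PySem.Set.contains, PySem.Set.ofList, hY, walk18]
    by_cases hI : c = 'I'
    · simp [pvWalk, pvTransEq, pvAccept, PySem.Dict.get?_mk_cons, PySem.Set.contains, PySem.Set.ofList, hI, walk21]
    simp [pvWalk, pvTransEq, PySem.Dict.get?, hT, Ne.symm hT, hC, Ne.symm hC, hD, Ne.symm hD, hR, Ne.symm hR, hP, Ne.symm hP, hY, Ne.symm hY, hI, Ne.symm hI]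

theorem is_stablecoin_pair_py_spec : Claim_equal_is_stablecoin_pair_py := by
  intro pair _
  unfold Spec_is_stablecoin_pair_py is_stablecoin_pair_py is_stablecoin_pair_py_alt
  split
  · rfl
  · set pu := PySem.Str.upper pair with hpu
    set r := pu.toList.reverse with hr
    have e4 : ∀ (q : String) (t : List Char), q.toList.reverse = t → q.toList.length = 4 →
        PySem.Str.endswith pu q = (r.take 4 == t) := by
      intro q t ht hq; rw [endswith_rev, hq, ht, hr]
    have e3 : ∀ (q : String) (t : List Char), q.toList.reverse = t → q.toList.length = 3 →
        PySem.Str.endswith pu q = (r.take 3 == t) := by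
      intro q t ht hq; rw [endswith_rev, hq, ht, hr]
    simp only [pvQuoteLoop, Bool.if_true_left, Bool.or_false]
    rw [e4 "USDT" ['T','D','S','U'] rfl rfl, e4 "USDC" ['C','D','S','U'] rfl rfl,
      e4 "ZUSD" ['D','S','U','Z'] rfl rfl, e3 "USD" ['D','S','U'] rfl rfl,
      e4 "ZEUR" ['R','U','E','Z'] rfl rfl, e3 "EUR" ['R','U','E'] rfl rfl,
      e4 "ZGBP" ['P','B','G','Z'] rfl rfl, e3 "GBP" ['P','B','G'] rfl rfl,
      e4 "ZJPY" ['Y','P','J','Z'] rfl rfl, e3 "JPY" ['Y','P','J'] rfl rfl,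
      e3 "DAI" ['I','A','D'] rfl rfl, e4 "BUSD" ['D','S','U','B'] rfl rfl, walk0]
    have hZUSD : r.take 4 = ['D','S','U','Z'] → r.take 3 = ['D','S','U'] :=
      fun h => take3_of_take4 r _ _ _ _ h
    have hBUSD : r.take 4 = ['D','S','U','B'] → r.take 3 = ['D','S','U'] :=
      fun h => take3_of_take4 r _ _ _ _ h
    have hZEUR : r.take 4 = ['R','U','E','Z'] → r.take 3 = ['R','U','E'] :=
      fun h => take3_of_take4 r _ _ _ _ h
    have hZGBP : r.take 4 = ['P','B','G','Z'] → r.take 3 = ['P','B','G'] :=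
      fun h => take3_of_take4 r _ _ _ _ h
    have hZJPY : r.take 4 = ['Y','P','J','Z'] → r.take 3 = ['Y','P','J'] :=
      fun h => take3_of_take4 r _ _ _ _ h
    rw [Bool.eq_iff_iff]
    simp only [Bool.or_eq_true, beq_iff_eq, decide_eq_true_eq]
    constructor
    · rintro (h|h|h|h|h|h|h|h|h|h|h|h)
      · exact Or.inl (Or.inl (Or.inl (Or.inl (Or.inl (Or.inl h)))))
      · exact Or.inl (Or.inl (Or.inl (Or.inl (Or.inl (Or.inr h)))))
      · exact Or.inl (Or.inl (Or.inl (Or.inl (Or.inr (hZUSD h)))))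
      · exact Or.inl (Or.inl (Or.inl (Or.inl (Or.inr h))))
      · exact Or.inl (Or.inl (Or.inl (Or.inr (hZEUR h))))
      · exact Or.inl (Or.inl (Or.inl (Or.inr h)))
      · exact Or.inl (Or.inl (Or.inr (hZGBP h)))
      · exact Or.inl (Or.inl (Or.inr h))
      · exact Or.inl (Or.inr (hZJPY h))
      · exact Or.inl (Or.inr h)
      · exact Or.inr h
      · exact Or.inl (Or.inl (Or.inl (Or.inl (Or.inr (hBUSD h)))))
    · rintro ((((((h|h)|h)|h)|h)|h)|h)
      · exact Or.inl h
      · exact Or.inr (Or.inl h)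
      · exact Or.inr (Or.inr (Or.inr (Or.inl h)))
      · exact Or.inr (Or.inr (Or.inr (Or.inr (Or.inr (Or.inl h)))))
      · exact Or.inr (Or.inr (Or.inr (Or.inr (Or.inr (Or.inr (Or.inr (Or.inl h)))))))
      · exact Or.inr (Or.inr (Or.inr (Or.inr (Or.inr (Or.inr (Or.inr (Or.inr (Or.inr (Or.inl h)))))))))
      · exact Or.inr (Or.inr (Or.inr (Or.inr (Or.inr (Or.inr (Or.inr (Or.inr (Or.inr (Or.inr (Or.inl h))))))))))
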